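-- pv_equiv track=rewrite | github.com/nikden13/practica | tree.py | getStirlingNumber
-- ===== SOURCE A (Python) =====
-- def getStirlingNumber(code):
--     stirlingNumber = []
--     savedValues = []
--     for index in range(len(code)):
--         if code[index] in savedValues:
--             indexStirlingNumber = savedValues.index(code[index])
--             stirlingNumber[indexStirlingNumber].append(index + 1)
--             continue
--         else:
--             stirlingNumber.append([index + 1])
--         savedValues.append(code[index])
--     return stirlingNumber
-- ===== SOURCE B (Python) =====
-- def getStirlingNumber(code):
--     # Phase 1: distinct values in first-occurrence order
--     distinct = []
--     seen = set()
--     for v in code: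
--         if v not in seen:
--             seen.add(v)
--             distinct.append(v)
--     # Phase 2: for each distinct value, rescan code collecting its 1-based positions
--     return [[i + 1 for i, x in enumerate(code) if x == v] for v in distinct]
-- ===== Notes on version B (the rewrite author's own statement) =====
-- stated objective: alternative
-- what changed: Replaces A's single incremental pass (membership test in a saved-values list, list.index rescans, in-place group appends) with a two-phase structure: one pass collects the distinct values in first-occurrence order using a set, then each distinct value's whole group is built by a fresh left-to-right scan over the input; no partial groups are ever mutated.
import Mathlib
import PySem

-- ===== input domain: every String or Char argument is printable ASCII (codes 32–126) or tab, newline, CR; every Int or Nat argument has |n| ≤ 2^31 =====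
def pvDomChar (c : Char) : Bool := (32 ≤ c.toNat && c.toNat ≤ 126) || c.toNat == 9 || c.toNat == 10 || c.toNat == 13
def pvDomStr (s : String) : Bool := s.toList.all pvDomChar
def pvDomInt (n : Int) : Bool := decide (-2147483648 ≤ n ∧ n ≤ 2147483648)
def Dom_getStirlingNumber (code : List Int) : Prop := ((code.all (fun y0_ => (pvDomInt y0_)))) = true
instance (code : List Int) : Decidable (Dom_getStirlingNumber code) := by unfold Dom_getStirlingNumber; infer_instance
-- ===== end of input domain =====

-- B replaces A's single incremental pass (saved-values list, list.index, in-place appends) by a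
-- two-phase structure: collect distinct values in first-occurrence order, then build each value's
-- whole group by a fresh left-to-right scan of the input.

-- ===== PORT A =====
-- A's loop 'for index in range(len(code))' carrying stirlingNumber (sn) and savedValues (sv);
-- sv.index(v) is PySem.List.index? (always some inside the v ∈ sv branch), the in-place
-- stirlingNumber[idx].append is List.modify.
def pvLoopA : List Int → Int → List (List Int) → List Int → List (List Int)
  | [], _, sn, _ => sn
  | v :: rest, i, sn, sv =>
    if v ∈ sv then
      pvLoopA rest (i + 1) (sn.modify ((PySem.List.index? sv v).getD 0) (· ++ [i + 1])) sv
    else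
      pvLoopA rest (i + 1) (sn ++ [[i + 1]]) (sv ++ [v])

def getStirlingNumber (code : List Int) : List (List Int) :=
  pvLoopA code 0 [] []

-- ===== PORT B =====
-- Phase 1 of Source B: 'for v in code: if v not in seen: seen.add(v); distinct.append(v)' — a loop
-- carrying the set 'seen' (PySem.Set) and the list 'distinct'.
def pvDistinctLoop : List Int → PySem.Set Int → List Int → List Int
  | [], _, dl => dl
  | v :: rest, seen, dl =>
    if PySem.Set.contains seen v then pvDistinctLoop rest seen dl
    else pvDistinctLoop rest (PySem.Set.add seen v) (dl ++ [v])

-- Phase 2: '[[i + 1 for i, x in enumerate(code) if x == v] for v in distinct]'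
def getStirlingNumber_alt (code : List Int) : List (List Int) :=
  (pvDistinctLoop code PySem.Set.empty []).map
    (fun v => ((PySem.List.enumerate code 0).filter (fun p => p.2 == v)).map (fun p => p.1 + 1))

-- ===== PRECONDITION & SPEC =====
def Spec_getStirlingNumber (code : List Int) (out : List (List Int)) : Prop := out = getStirlingNumber_alt code
instance (code : List Int) (out : List (List Int)) : Decidable (Spec_getStirlingNumber code out) := by unfold Spec_getStirlingNumber; infer_instance

-- ===== CLAIM =====
def Claim_equal_getStirlingNumber : Prop := ∀ (code : List Int), Dom_getStirlingNumber code → Spec_getStirlingNumber code (getStirlingNumber code)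

-- ===== LEMMAS AND PROOFS =====

-- the 1-based positions of v in a list whose first element sits at (1-based) position i+1
def pvPosFrom (i : Int) : List Int → Int → List Int
  | [], _ => []
  | x :: xs, v => if x = v then (i + 1) :: pvPosFrom (i + 1) xs v else pvPosFrom (i + 1) xs v

lemma pvFilter_enumerate_eq_posFrom (code : List Int) (s v : Int) :
    ((PySem.List.enumerate code s).filter (fun p => p.2 == v)).map (fun p => p.1 + 1)
      = pvPosFrom s code v := by
  induction code generalizing s with
  | nil => simp [PySem.List.enumerate_nil, pvPosFrom]
  | cons x xs ih =>
    rw [PySem.List.enumerate_cons]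
    simp only [List.filter_cons, pvPosFrom]
    by_cases h : x = v <;> simp [h, ih]

-- B's phase-1 loop, started with seen = distinct (both empty initially), is foldl Set.add
lemma pvDistinctLoop_eq_foldl : ∀ (rest : List Int) (s : List Int),
    pvDistinctLoop rest s s = List.foldl PySem.Set.add s rest := by
  intro rest
  induction rest with
  | nil => intro s; rfl
  | cons v rest ih =>
    intro s
    cases hc : PySem.Set.contains s v with
    | true =>
      have hm : v ∈ s := by simpa using hc
      have hadd : PySem.Set.add s v = s := by simp [PySem.Set.add, hm]
      simp only [pvDistinctLoop, List.foldl_cons, hadd]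
      rw [if_pos hc]
      exact ih s
    | false =>
      have hm : v ∉ s := by simpa using hc
      have hadd : PySem.Set.add s v = s ++ [v] := by simp [PySem.Set.add, hm]
      simp only [pvDistinctLoop, List.foldl_cons, hadd]
      rw [if_neg (by simpa using hm)]
      exact ih (s ++ [v])

-- invariant of A's loop: the groups are, in first-occurrence order of the values seen so far,
-- the already-accumulated positions followed by the positions still to come
lemma pvLoopA_inv : ∀ (rest : List Int) (i : Int) (order : List Int) (acc : Int → List Int),
    order.Nodup →
    pvLoopA rest i (order.map acc) order
      = (List.foldl PySem.Set.add order rest).map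
          (fun v => (if v ∈ order then acc v else []) ++ pvPosFrom i rest v) := by
  intro rest
  induction rest with
  | nil =>
    intro i order acc _
    simp only [pvLoopA, List.foldl_nil, pvPosFrom, List.append_nil]
    refine (List.map_congr_left ?_).symm
    intro v hv
    simp [hv]
  | cons x rest ih =>
    intro i order acc hnd
    by_cases hm : x ∈ order
    · -- repeated value: append to its existing group
      obtain ⟨k, hk⟩ := (PySem.List.index?_isSome_iff (xs := order) (v := x)).2 hm
        |> fun h => Option.isSome_iff_exists.mp h
      obtain ⟨hklt, hkx, _⟩ := PySem.List.getElem_of_index?_eq_some hk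
      have hadd : PySem.Set.add order x = order := by
        simp [PySem.Set.add, hm]
      have hmod : (order.map acc).modify k (· ++ [i + 1])
          = order.map (fun w => if w = x then acc x ++ [i + 1] else acc w) := by
        apply List.ext_getElem
        · simp [List.length_modify]
        · intro j hj hj'
          have hjlt : j < order.length := by simpa using hj'
          rw [List.getElem_modify]
          by_cases hjk : j = k
          · subst hjk
            simp [List.getElem_map, hkx]
          · have : order[j] ≠ x := by
              intro hx
              exact hjk ((List.Nodup.getElem_inj_iff hnd).1 (hx.trans hkx.symm))
            rw [if_neg (fun h : k = j => hjk h.symm)]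
            simp [List.getElem_map, this]
      simp only [pvLoopA, if_pos hm, hk, Option.getD_some, hmod]
      rw [ih (i + 1) order (fun w => if w = x then acc x ++ [i + 1] else acc w) hnd]
      rw [List.foldl_cons, hadd]
      apply List.map_congr_left
      intro v _
      by_cases hvx : v = x
      · subst hvx
        simp [pvPosFrom, hm]
      · have hxv : ¬ x = v := fun h => hvx h.symm
        simp [pvPosFrom, hvx, hxv]
    · -- new value: open a new group and remember the value
      have hadd : PySem.Set.add order x = order ++ [x] := by
        simp [PySem.Set.add, hm]
      have hnew : order.map acc ++ [[i + 1]]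
          = (order ++ [x]).map (fun w => if w = x then [i + 1] else acc w) := by
        rw [List.map_append]
        congr 1
        · refine List.map_congr_left ?_ |>.symm
          intro w hw
          have : w ≠ x := fun h => hm (h ▸ hw)
          simp [this]
        · simp
      have hnd' : (order ++ [x]).Nodup := by
        rw [List.nodup_append]
        refine ⟨hnd, List.nodup_singleton x, ?_⟩
        intro a ha b hb
        rw [List.mem_singleton] at hb
        subst hb
        exact fun h => hm (h ▸ ha)
      simp only [pvLoopA, if_neg hm, hnew]
      rw [ih (i + 1) (order ++ [x]) (fun w => if w = x then [i + 1] else acc w) hnd']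
      rw [List.foldl_cons, hadd]
      apply List.map_congr_left
      intro v _
      by_cases hvx : v = x
      · subst hvx
        simp [pvPosFrom, hm]
      · have : ¬ (x = v) := fun h => hvx h.symm
        simp [pvPosFrom, hvx, this, List.mem_append]

-- ===== VERDICT =====
theorem getStirlingNumber_spec : Claim_equal_getStirlingNumber := by
  intro code _
  unfold Spec_getStirlingNumber getStirlingNumber getStirlingNumber_alt
  have hA := pvLoopA_inv code 0 [] (fun _ => []) List.nodup_nil
  simp only [List.map_nil] at hA
  have hB : pvDistinctLoop code PySem.Set.empty [] = List.foldl PySem.Set.add [] code :=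
    pvDistinctLoop_eq_foldl code []
  rw [hA, hB]
  apply List.map_congr_left
  intro v _
  simp [pvFilter_enumerate_eq_posFrom]
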